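-- pv_equiv track=rewrite | github.com/aelzeiny/adventofcode_2021 | day03/day03.py | filtering_calculator
-- ===== SOURCE A (Python) =====
-- from typing import List, Dict, Tuple
-- from collections import defaultdict
--
-- def get_binary_counter_at_pos(binary_nums: List[List[int]], pos: int):
--     binary_counter = defaultdict(int)
--     for binary in binary_nums:
--         binary_counter[binary[pos]] += 1
--     return binary_counter
--
-- def filtering_calculator(binary_nums: List[List[int]], filter_type: str):
--     filtered_nums = binary_nums
--     dim = len(filtered_nums[0])
--     for i in range(dim):
--         counter = get_binary_counter_at_pos(filtered_nums, i)
--         if filter_type == 'oxygen':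
--             filtering_criteria = 1 if counter[1] >= counter[0] else 0
--         elif filter_type == 'co2':
--             filtering_criteria = 0 if counter[0] <= counter[1] else 1
--         else:
--             raise ValueError('Unknown Type')
--
--         filtered_nums = [
--             b for b in filtered_nums
--             if b[i] == filtering_criteria
--         ]
--         if len(filtered_nums) == 1:
--             return filtered_nums[0]
--     raise ValueError('Incomplete dataset?')
-- ===== SOURCE B (Python) =====
-- def filtering_calculator(binary_nums, filter_type):
--     if filter_type not in ('oxygen', 'co2'):
--         raise ValueError('Unknown Type')
--     dim = len(binary_nums[0])
--     # Build a binary trie: each node counts the rows passing through it and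
--     # remembers the first such row; only 0/1 branches are kept, because the
--     # filtering criterion is always a bit, so rows diverge at their first
--     # non-bit value and are counted but never descended into.
--     root = {'cnt': 0, 'row': None, 0: None, 1: None}
--     for row in binary_nums:
--         root['cnt'] += 1
--         if root['row'] is None:
--             root['row'] = row
--         node = root
--         for v in row:
--             if v != 0 and v != 1:
--                 break
--             child = node[v]
--             if child is None:
--                 child = {'cnt': 0, 'row': None, 0: None, 1: None}
--                 node[v] = child
--             child['cnt'] += 1
--             if child['row'] is None:
--                 child['row'] = row
--             node = child
--     # Descend: the child counts are exactly counter[0]/counter[1] of the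
--     # surviving rows; a count of 1 means a unique survivor (its stored row).
--     node = root
--     for _ in range(dim):
--         c0 = node[0]['cnt'] if node[0] is not None else 0
--         c1 = node[1]['cnt'] if node[1] is not None else 0
--         if filter_type == 'oxygen':
--             child = node[1] if c1 >= c0 else node[0]
--         else:
--             child = node[0] if c0 <= c1 else node[1]
--         if child is None:
--             raise ValueError('Incomplete dataset?')
--         if child['cnt'] == 1:
--             return child['row']
--         node = child
--     raise ValueError('Incomplete dataset?')
-- ===== Notes on version B (the rewrite author's own statement) =====
-- stated objective: alternative
-- what changed: A repeatedly re-filters the surviving list and rebuilds a counter dict at each bit position; B builds a binary trie once (node = count of rows through it + first such row, 0/1 children) and walks down it, reading counter[0]/counter[1] off the child counts and returning the stored row when a count hits 1.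
import Mathlib
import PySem

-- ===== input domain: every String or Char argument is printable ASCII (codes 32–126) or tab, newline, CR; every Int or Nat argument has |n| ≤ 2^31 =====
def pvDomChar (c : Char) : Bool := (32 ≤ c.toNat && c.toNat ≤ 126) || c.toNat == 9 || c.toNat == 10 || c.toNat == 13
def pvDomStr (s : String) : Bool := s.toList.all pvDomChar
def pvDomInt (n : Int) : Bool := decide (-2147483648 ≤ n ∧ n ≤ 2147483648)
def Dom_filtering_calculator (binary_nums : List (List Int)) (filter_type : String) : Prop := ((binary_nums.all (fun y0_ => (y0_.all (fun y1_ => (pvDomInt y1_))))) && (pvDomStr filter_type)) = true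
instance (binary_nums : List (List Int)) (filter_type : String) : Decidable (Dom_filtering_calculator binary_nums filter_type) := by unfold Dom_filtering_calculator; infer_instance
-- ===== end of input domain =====

-- B replaces A's repeated filter-and-recount passes by one binary trie whose node counts
-- are the per-position counters (objective: alternative decomposition, same asymptotic cost).

-- ===== PORT A =====
-- get_binary_counter_at_pos: defaultdict(int) counting binary[pos]; none = IndexError
def counterLoop : List (List Int) → Int → PySem.Dict Int Int → Option (PySem.Dict Int Int)
  | [], _, d => some d
  | b :: rest, pos, d =>
    match PySem.List.pyGet? b pos with
    | none => none
    | some v => counterLoop rest pos (d.modify v 0 (· + 1))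

-- the for-i-in-range(dim) loop; fuel = remaining iterations; none = ValueError/IndexError
def aLoop (ft : String) : Nat → List (List Int) → Nat → Option (List Int)
  | 0, _, _ => none                      -- loop exhausted: ValueError('Incomplete dataset?')
  | fuel + 1, filtered, i =>
    match counterLoop filtered (i : Int) PySem.Dict.empty with
    | none => none                       -- IndexError inside the counter
    | some counter =>
      match (if ft == "oxygen" then some (if counter.getD 1 0 ≥ counter.getD 0 0 then (1 : Int) else 0)
             else if ft == "co2" then some (if counter.getD 0 0 ≤ counter.getD 1 0 then (0 : Int) else 1)
             else none) with
      | none => none                     -- ValueError('Unknown Type')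
      | some c =>
        let fns := filtered.filter (fun b => PySem.List.pyGet? b (i : Int) == some c)
        if fns.length == 1 then PySem.List.pyGet? fns 0 else aLoop ft fuel fns (i + 1)

def filtering_calculator (binary_nums : List (List Int)) (filter_type : String) : List Int :=
  match PySem.List.pyGet? binary_nums 0 with
  | none => []                           -- IndexError on binary_nums[0]
  | some h =>
    match aLoop filter_type h.length binary_nums 0 with
    | some r => r
    | none => []                         -- an exception was raised

-- ===== PORT B =====
inductive BTrie where
  | nil : BTrie
  | node : Nat → List Int → BTrie → BTrie → BTrie
deriving Repr, DecidableEq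

def BTrie.cntOf : BTrie → Nat
  | .nil => 0
  | .node c _ _ _ => c

def BTrie.zOf : BTrie → BTrie
  | .nil => .nil
  | .node _ _ z _ => z

def BTrie.oOf : BTrie → BTrie
  | .nil => .nil
  | .node _ _ _ o => o

-- insert one row: bump the count along its 0/1-prefix path, remember the first row per node
def bump : BTrie → List Int → List Int → BTrie
  | .nil, [], row => .node 1 row .nil .nil
  | .nil, v :: vs, row =>
    if v == 0 then .node 1 row (bump .nil vs row) .nil
    else if v == 1 then .node 1 row .nil (bump .nil vs row)
    else .node 1 row .nil .nil
  | .node c r z o, [], _ => .node (c + 1) r z o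
  | .node c r z o, v :: vs, row =>
    if v == 0 then .node (c + 1) r (bump z vs row) o
    else if v == 1 then .node (c + 1) r z (bump o vs row)
    else .node (c + 1) r z o

def buildT (L : List (List Int)) : BTrie := L.foldl (fun t b => bump t b b) .nil

def descend (ft : String) : BTrie → Nat → Option (List Int)
  | _, 0 => none                         -- range(dim) exhausted: ValueError
  | t, fuel + 1 =>
    let cz := t.zOf.cntOf
    let co := t.oOf.cntOf
    let child := if ft == "oxygen" then (if co ≥ cz then t.oOf else t.zOf)
                 else (if cz ≤ co then t.zOf else t.oOf)
    match child with
    | .nil => none                       -- no survivor: ValueError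
    | .node c row z o => if c == 1 then some row else descend ft (.node c row z o) fuel

def filtering_calculator_alt (binary_nums : List (List Int)) (filter_type : String) : List Int :=
  if filter_type == "oxygen" || filter_type == "co2" then
    match binary_nums with
    | [] => []                           -- IndexError on binary_nums[0]
    | h :: t =>
      match descend filter_type (buildT (h :: t)) h.length with
      | some r => r
      | none => []                       -- ValueError
  else []                                -- ValueError('Unknown Type')

-- ===== PRECONDITION & SPEC =====
-- helpers for Pre_: Sel L r j = the rows agreeing with r on the first j positions
-- (= A's surviving list after j steps when r survives them); crit = the kept bit.
def pref (r : List Int) (j : Nat) (b : List Int) : Bool := b.take j == r.take j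

def Sel (L : List (List Int)) (r : List Int) (j : Nat) : List (List Int) := L.filter (pref r j)

def crit (ft : String) (c0 c1 : Nat) : Int :=
  if ft = "oxygen" then (if c1 ≥ c0 then 1 else 0) else (if c0 ≤ c1 then 0 else 1)

def cntAt (L : List (List Int)) (r : List Int) (j : Nat) (v : Int) : Nat :=
  (Sel L r j).countP (fun b => b.getD j 2 == v)

-- step j is safe and keeps r: every survivor has a bit at j and r's bit is the kept one
def okStep (L : List (List Int)) (ft : String) (r : List Int) (j : Nat) : Bool :=
  decide (∀ b ∈ Sel L r j, j < b.length) &&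
  (r.getD j 2 == crit ft (cntAt L r j 0) (cntAt L r j 1))

def headDim : List (List Int) → Nat
  | [] => 0
  | h :: _ => h.length

-- Pre_ holds exactly when A returns normally: the filter type is known and some row r is,
-- after some step k < dim, the unique survivor of the bit-filtering, with no IndexError on the way.
def Pre_filtering_calculator (binary_nums : List (List Int)) (filter_type : String) : Prop :=
  (filter_type = "oxygen" ∨ filter_type = "co2") ∧
  ∃ r ∈ binary_nums, ∃ k ∈ List.range (headDim binary_nums),
    (List.range (k + 1)).all (okStep binary_nums filter_type r) = true ∧
    (Sel binary_nums r (k + 1)).length = 1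

instance (binary_nums : List (List Int)) (filter_type : String) : Decidable (Pre_filtering_calculator binary_nums filter_type) := by
  unfold Pre_filtering_calculator; infer_instance

def pvWitness_filtering_calculator : List (List Int) × String := ([[0, 1], [1, 0], [1, 1]], "oxygen")

def Spec_filtering_calculator (binary_nums : List (List Int)) (filter_type : String) (out : List Int) : Prop := out = filtering_calculator_alt binary_nums filter_type
instance (binary_nums : List (List Int)) (filter_type : String) (out : List Int) : Decidable (Spec_filtering_calculator binary_nums filter_type out) := by unfold Spec_filtering_calculator; infer_instance

-- ===== CLAIM (what is proved, stated in full; the proofs are below) =====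
def Claim_equal_filtering_calculator : Prop := ∀ (binary_nums : List (List Int)) (filter_type : String), Dom_filtering_calculator binary_nums filter_type → Pre_filtering_calculator binary_nums filter_type → Spec_filtering_calculator binary_nums filter_type (filtering_calculator binary_nums filter_type)

-- ===== LEMMAS AND PROOFS =====

-- ---- generic facts about pref / Sel ----

theorem pref_zero (r b : List Int) : pref r 0 b = true := by simp [pref]

theorem Sel_zero (L : List (List Int)) (r : List Int) : Sel L r 0 = L := by
  simp [Sel, pref_zero]

theorem mem_Sel_self {L : List (List Int)} {r : List Int} (hr : r ∈ L) (j : Nat) :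
    r ∈ Sel L r j := by
  simp [Sel, pref, List.mem_filter, hr]

theorem pref_mono {r b : List Int} {j j' : Nat} (h : j ≤ j') (hp : pref r j' b = true) :
    pref r j b = true := by
  simp only [pref, beq_iff_eq] at *
  have := congrArg (List.take j) hp
  simpa [List.take_take, Nat.min_eq_left h] using this

theorem pref_succ {r b : List Int} {j : Nat} (hb : j < b.length) (hr : j < r.length) :
    pref r (j + 1) b = (pref r j b && (b.getD j 2 == r.getD j 2)) := by
  simp only [pref, List.take_add_one, List.getElem?_eq_getElem hb, List.getElem?_eq_getElem hr,
    List.getD_eq_getElem?_getD, Option.toList_some, Option.getD_some]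
  rw [Bool.eq_iff_iff]
  simp only [beq_iff_eq, Bool.and_eq_true, ← List.concat_eq_append, List.concat_inj]

theorem singleton_of_len_one {α : Type} {l : List α} {a : α} (h : l.length = 1) (ha : a ∈ l) :
    l = [a] := by
  match l, h with
  | [x], _ => simp_all

theorem okStep_iff {L : List (List Int)} {ft : String} {r : List Int} {j : Nat} :
    okStep L ft r j = true ↔
      (∀ b ∈ Sel L r j, j < b.length) ∧ r.getD j 2 = crit ft (cntAt L r j 0) (cntAt L r j 1) := by
  simp [okStep]

theorem crit_mem (ft : String) (c0 c1 : Nat) : crit ft c0 c1 = 0 ∨ crit ft c0 c1 = 1 := by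
  unfold crit; split_ifs <;> simp

-- ---- A-side loop lemmas ----

theorem counterLoop_eq {j : Nat} :
    ∀ (F : List (List Int)) (d : PySem.Dict Int Int), (∀ b ∈ F, j < b.length) →
      counterLoop F (j : Int) d =
        some (F.foldl (fun d b => d.modify (b.getD j 2) 0 (· + 1)) d) := by
  intro F
  induction F with
  | nil => intro d _; rfl
  | cons b F ih =>
    intro d h
    have hb : j < b.length := h b List.mem_cons_self
    simp only [counterLoop, PySem.List.pyGet?_natCast, List.getElem?_eq_getElem hb,
      List.foldl_cons]
    rw [show b.getD j 2 = b[j] from by simp [List.getD_eq_getElem?_getD, List.getElem?_eq_getElem hb]]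
    exact ih _ (fun b' hb' => h b' (List.mem_cons_of_mem _ hb'))

theorem counter_getD_gen {j : Nat} :
    ∀ (F : List (List Int)) (d : PySem.Dict Int Int) (v : Int),
      (F.foldl (fun d b => d.modify (b.getD j 2) 0 (· + 1)) d).getD v 0 =
        d.getD v 0 + (F.countP (fun b => b.getD j 2 == v) : Int) := by
  intro F
  induction F with
  | nil => intro d v; simp
  | cons b F ih =>
    intro d v
    rw [List.foldl_cons, ih, List.countP_cons, PySem.Dict.getD_modify]
    by_cases h : v = b.getD j 2
    · subst h; simp only [if_pos rfl, beq_self_eq_true, if_pos]; push_cast; ring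
    · have hb : (b.getD j 2 == v) = false := beq_eq_false_iff_ne.mpr (fun hh => h hh.symm)
      rw [if_neg h, hb]
      simp

theorem counter_getD {j : Nat} (F : List (List Int)) (v : Int) :
    (F.foldl (fun d b => d.modify (b.getD j 2) 0 (· + 1)) PySem.Dict.empty).getD v 0 =
      (F.countP (fun b => b.getD j 2 == v) : Int) := by
  rw [counter_getD_gen]; simp

theorem Sel_succ {L : List (List Int)} {r : List Int} {j : Nat}
    (hin : ∀ b ∈ Sel L r j, j < b.length) (hr : j < r.length) :
    Sel L r (j + 1) = (Sel L r j).filter (fun b => b.getD j 2 == r.getD j 2) := by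
  unfold Sel
  rw [List.filter_filter]
  apply List.filter_congr
  intro b hb
  by_cases hpj : pref r j b = true
  · have hbl : j < b.length := hin b (List.mem_filter.mpr ⟨hb, hpj⟩)
    rw [pref_succ hbl hr, hpj]
    simp [Bool.and_comm]
  · have h2 : pref r (j + 1) b = false :=
      Bool.eq_false_iff.mpr (fun h => hpj (pref_mono (Nat.le_succ j) h))
    rw [h2]
    simp [Bool.eq_false_iff.mpr hpj]

theorem aLoop_eq (L : List (List Int)) (ft : String) (r : List Int)
    (hft : ft = "oxygen" ∨ ft = "co2") (hr : r ∈ L) (k : Nat)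
    (hok : ∀ j ≤ k, okStep L ft r j = true)
    (h1 : (Sel L r (k + 1)).length = 1) :
    ∀ fuel j, j ≤ k → k - j < fuel → aLoop ft fuel (Sel L r j) j = some r := by
  intro fuel
  induction fuel with
  | zero => intro j hj hf; omega
  | succ fuel ih =>
    intro j hj hf
    obtain ⟨hin, hcrit⟩ := okStep_iff.mp (hok j hj)
    have hrS : r ∈ Sel L r j := mem_Sel_self hr j
    have hrlen : j < r.length := hin r hrS
    simp only [aLoop]
    rw [counterLoop_eq _ _ hin]
    have hcntv : ∀ v : Int,
        ((Sel L r j).foldl (fun d b => d.modify (b.getD j 2) 0 (· + 1)) PySem.Dict.empty).getD v 0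
          = (cntAt L r j v : Int) := fun v => counter_getD _ v
    have hfil : (Sel L r j).filter (fun b => PySem.List.pyGet? b (j : Int) == some (r.getD j 2))
        = Sel L r (j + 1) := by
      rw [Sel_succ hin hrlen]
      apply List.filter_congr
      intro b hb
      have hbl := hin b hb
      rw [PySem.List.pyGet?_natCast, List.getElem?_eq_getElem hbl, Bool.eq_iff_iff]
      simp [beq_iff_eq, List.getD_eq_getElem?_getD, List.getElem?_eq_getElem hbl]
    have hfin : ∀ res : Option (List Int),
        (if (Sel L r (j+1)).length == 1 then PySem.List.pyGet? (Sel L r (j+1)) 0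
         else aLoop ft fuel (Sel L r (j+1)) (j+1)) = some r := by
      intro _
      by_cases hone : (Sel L r (j + 1)).length = 1
      · have hsel : Sel L r (j + 1) = [r] := singleton_of_len_one hone (mem_Sel_self hr (j + 1))
        simp [hone, hsel, PySem.List.pyGet?_zero_cons]
      · have hjk : j < k := by
          rcases Nat.lt_or_ge j k with hlt | hge
          · exact hlt
          · exfalso; have : j = k := le_antisymm hj hge; subst this; exact hone h1
        have hne : ((Sel L r (j + 1)).length == 1) = false := by
          simp [hone]
        rw [hne]
        simp only [Bool.false_eq_true, if_false]
        exact ih (j + 1) hjk (by omega)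
    rcases hft with rfl | rfl
    · have hc : (if ((cntAt L r j 1 : Int) ≥ (cntAt L r j 0 : Int)) then (1 : Int) else 0)
          = r.getD j 2 := by
        rw [hcrit]; unfold crit; rw [if_pos rfl]
        by_cases hge : cntAt L r j 0 ≤ cntAt L r j 1
        · rw [if_pos (by exact_mod_cast hge), if_pos hge]
        · rw [if_neg (by exact_mod_cast hge), if_neg hge]
      simp only [beq_self_eq_true, if_true, hcntv, hc, hfil]
      exact hfin none
    · have hc : (if ((cntAt L r j 0 : Int) ≤ (cntAt L r j 1 : Int)) then (0 : Int) else 1)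
          = r.getD j 2 := by
        rw [hcrit]; unfold crit; rw [if_neg (show ¬("co2" = "oxygen") by decide)]
        by_cases hge : cntAt L r j 0 ≤ cntAt L r j 1
        · rw [if_pos (by exact_mod_cast hge), if_pos hge]
        · rw [if_neg (by exact_mod_cast hge), if_neg hge]
      have hne : ("co2" == "oxygen") = false := by decide
      simp only [hne, Bool.false_eq_true, if_false, beq_self_eq_true, if_true, hcntv, hc, hfil]
      exact hfin none

-- ---- B-side trie lemmas ----

def BTrie.rowOf : BTrie → List Int
  | .nil => []
  | .node _ r _ _ => r

-- the node reached by following a 0/1 path from t (proof-side only)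
def reachT : BTrie → List Int → BTrie
  | t, [] => t
  | t, v :: vs => reachT (if v == 0 then t.zOf else t.oOf) vs

theorem reach_nil (p : List Int) : reachT .nil p = .nil := by
  induction p with
  | nil => rfl
  | cons v vs ih => simpa [reachT, BTrie.zOf, BTrie.oOf] using ih

theorem reach_snoc (t : BTrie) (p : List Int) (v : Int) :
    reachT t (p ++ [v]) = (if v == 0 then (reachT t p).zOf else (reachT t p).oOf) := by
  induction p generalizing t with
  | nil => simp [reachT]
  | cons w ws ih => simp [reachT, ih]

theorem cnt_bump : ∀ (p : List Int), (∀ v ∈ p, v = 0 ∨ v = 1) → ∀ (t : BTrie) (b row : List Int),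
    (reachT (bump t b row) p).cntOf
      = (reachT t p).cntOf + (if b.take p.length == p then 1 else 0) := by
  intro p
  induction p with
  | nil =>
    intro _ t b row
    rcases t with _ | ⟨c, r0, z, o⟩ <;> rcases b with _ | ⟨w, ws⟩ <;>
      simp [bump, reachT, BTrie.cntOf] <;>
      by_cases hw0 : w = (0 : Int) <;> by_cases hw1 : w = (1 : Int) <;>
      simp_all [BTrie.cntOf]
  | cons v vs ih =>
    intro hp t b row
    have hvs : ∀ u ∈ vs, u = 0 ∨ u = 1 := fun u hu => hp u (List.mem_cons_of_mem _ hu)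
    have hv : v = 0 ∨ v = 1 := hp v List.mem_cons_self
    rcases t with _ | ⟨c, r0, z, o⟩ <;> rcases b with _ | ⟨w, ws⟩ <;> rcases hv with rfl | rfl <;>
      first
      | (by_cases hw0 : w = (0 : Int) <;> by_cases hw1 : w = (1 : Int) <;>
          simp_all [bump, reachT, reach_nil, BTrie.cntOf, BTrie.zOf, BTrie.oOf, ih hvs])
      | (simp [bump, reachT, reach_nil, BTrie.cntOf, BTrie.zOf, BTrie.oOf])

theorem nil_bump : ∀ (p : List Int), (∀ v ∈ p, v = 0 ∨ v = 1) → ∀ (t : BTrie) (b row : List Int),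
    (reachT (bump t b row) p = .nil) ↔ (reachT t p = .nil ∧ ¬(b.take p.length = p)) := by
  intro p
  induction p with
  | nil =>
    intro _ t b row
    rcases t with _ | ⟨c, r0, z, o⟩ <;> rcases b with _ | ⟨w, ws⟩ <;>
      simp [bump, reachT] <;>
      by_cases hw0 : w = (0 : Int) <;> by_cases hw1 : w = (1 : Int) <;>
      simp_all
  | cons v vs ih =>
    intro hp t b row
    have hvs : ∀ u ∈ vs, u = 0 ∨ u = 1 := fun u hu => hp u (List.mem_cons_of_mem _ hu)
    have hv : v = 0 ∨ v = 1 := hp v List.mem_cons_self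
    rcases t with _ | ⟨c, r0, z, o⟩ <;> rcases b with _ | ⟨w, ws⟩ <;> rcases hv with rfl | rfl <;>
      first
      | (by_cases hw0 : w = (0 : Int) <;> by_cases hw1 : w = (1 : Int) <;>
          simp_all [bump, reachT, reach_nil, BTrie.zOf, BTrie.oOf, ih hvs])
      | (simp [bump, reachT, reach_nil, BTrie.zOf, BTrie.oOf])

theorem row_bump : ∀ (p : List Int), (∀ v ∈ p, v = 0 ∨ v = 1) → ∀ (t : BTrie) (b row : List Int),
    reachT t p ≠ .nil →
    (reachT (bump t b row) p).rowOf = (reachT t p).rowOf := by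
  intro p
  induction p with
  | nil =>
    intro _ t b row h
    rcases t with _ | ⟨c, r0, z, o⟩
    · exact absurd rfl h
    · rcases b with _ | ⟨w, ws⟩ <;>
        simp [bump, reachT, BTrie.rowOf] <;>
        by_cases hw0 : w = (0 : Int) <;> by_cases hw1 : w = (1 : Int) <;>
        simp_all [BTrie.rowOf]
  | cons v vs ih =>
    intro hp t b row h
    have hvs : ∀ u ∈ vs, u = 0 ∨ u = 1 := fun u hu => hp u (List.mem_cons_of_mem _ hu)
    have hv : v = 0 ∨ v = 1 := hp v List.mem_cons_self
    rcases t with _ | ⟨c, r0, z, o⟩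
    · exact absurd (reach_nil _) h
    · rcases b with _ | ⟨w, ws⟩
      · rcases hv with rfl | rfl <;> simp_all [bump, reachT, BTrie.zOf, BTrie.oOf]
      · rcases hv with rfl | rfl
        · have hh : ¬ reachT z vs = BTrie.nil := by simpa [reachT, BTrie.zOf] using h
          by_cases hw0 : w = (0 : Int)
          · subst hw0
            simp only [bump, reachT, BTrie.zOf, BTrie.oOf]
            norm_num
            exact ih hvs z ws row hh
          · by_cases hw1 : w = (1 : Int) <;>
              simp_all [bump, reachT, BTrie.zOf, BTrie.oOf]
        · have hh : ¬ reachT o vs = BTrie.nil := by simpa [reachT, BTrie.oOf] using h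
          by_cases hw1 : w = (1 : Int)
          · subst hw1
            simp only [bump, reachT, BTrie.zOf, BTrie.oOf]
            norm_num
            exact ih hvs o ws row hh
          · by_cases hw0 : w = (0 : Int) <;>
              simp_all [bump, reachT, BTrie.zOf, BTrie.oOf]

theorem row_bump_new : ∀ (p : List Int), (∀ v ∈ p, v = 0 ∨ v = 1) → ∀ (t : BTrie) (b row : List Int),
    reachT t p = .nil → b.take p.length = p →
    (reachT (bump t b row) p).rowOf = row := by
  intro p
  induction p with
  | nil =>
    intro _ t b row h _
    rcases t with _ | ⟨c, r0, z, o⟩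
    · rcases b with _ | ⟨w, ws⟩ <;>
        simp [bump, reachT, BTrie.rowOf] <;>
        by_cases hw0 : w = (0 : Int) <;> by_cases hw1 : w = (1 : Int) <;>
        simp_all [BTrie.rowOf]
    · simp [reachT] at h
  | cons v vs ih =>
    intro hp t b row h hpre
    have hvs : ∀ u ∈ vs, u = 0 ∨ u = 1 := fun u hu => hp u (List.mem_cons_of_mem _ hu)
    have hv : v = 0 ∨ v = 1 := hp v List.mem_cons_self
    rcases b with _ | ⟨w, ws⟩
    · simp at hpre
    · have hw : w = v ∧ ws.take vs.length = vs := by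
        rw [List.length_cons, List.take_succ_cons] at hpre
        exact ⟨((List.cons.injEq ..).mp hpre).1, ((List.cons.injEq ..).mp hpre).2⟩
      rcases t with _ | ⟨c, r0, z, o⟩ <;> rcases hv with rfl | rfl <;>
        simp_all [bump, reachT, reach_nil, BTrie.zOf, BTrie.oOf, ih hvs]

theorem cnt_build_aux (p : List Int) (hp : ∀ v ∈ p, v = 0 ∨ v = 1) :
    ∀ (L : List (List Int)) (t : BTrie),
      (reachT (L.foldl (fun t b => bump t b b) t) p).cntOf
        = (reachT t p).cntOf + L.countP (fun b => b.take p.length == p) := by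
  intro L
  induction L with
  | nil => simp
  | cons b rest ih =>
    intro t
    simp only [List.foldl_cons, List.countP_cons, ih, cnt_bump p hp t b b]
    split <;> simp_all <;> omega

theorem row_fold_pres (p : List Int) (hp : ∀ v ∈ p, v = 0 ∨ v = 1) :
    ∀ (L : List (List Int)) (t : BTrie), reachT t p ≠ .nil →
      (reachT (L.foldl (fun t b => bump t b b) t) p).rowOf = (reachT t p).rowOf := by
  intro L
  induction L with
  | nil => intro t h; rfl
  | cons b rest ih =>
    intro t h
    rw [List.foldl_cons, ih _ (by simp only [ne_eq, nil_bump p hp]; tauto), row_bump p hp t b b h]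

theorem row_build_aux (p : List Int) (hp : ∀ v ∈ p, v = 0 ∨ v = 1) :
    ∀ (L : List (List Int)) (t : BTrie), reachT t p = .nil →
      (reachT (L.foldl (fun t b => bump t b b) t) p).rowOf
        = ((L.filter (fun b => b.take p.length == p)).head?).getD [] := by
  intro L
  induction L with
  | nil => intro t h; simp [h, BTrie.rowOf]
  | cons b rest ih =>
    intro t h
    rw [List.foldl_cons]
    by_cases hpre : b.take p.length = p
    · rw [row_fold_pres p hp rest _ (by simp only [ne_eq, nil_bump p hp]; tauto),
        row_bump_new p hp t b b h hpre]
      simp [hpre]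
    · rw [ih _ (by rw [nil_bump p hp]; exact ⟨h, hpre⟩)]
      simp [hpre]

theorem descend_eq (L : List (List Int)) (ft : String) (r : List Int)
    (hft : ft = "oxygen" ∨ ft = "co2") (hr : r ∈ L) (k : Nat)
    (hok : ∀ j ≤ k, okStep L ft r j = true)
    (h1 : (Sel L r (k + 1)).length = 1) :
    ∀ fuel j, j ≤ k → k - j < fuel → (∀ v ∈ r.take j, v = 0 ∨ v = 1) →
      descend ft (reachT (buildT L) (r.take j)) fuel = some r := by
  have Hcnt : ∀ p : List Int, (∀ v ∈ p, v = 0 ∨ v = 1) →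
      (reachT (buildT L) p).cntOf = L.countP (fun b => b.take p.length == p) := by
    intro p hp
    have := cnt_build_aux p hp L BTrie.nil
    simpa [buildT, reach_nil, BTrie.cntOf] using this
  intro fuel
  induction fuel with
  | zero => intro j hj hf _; omega
  | succ fuel ih =>
    intro j hj hf hbin
    obtain ⟨hin, hcrit⟩ := okStep_iff.mp (hok j hj)
    have hrS : r ∈ Sel L r j := mem_Sel_self hr j
    have hrlen : j < r.length := hin r hrS
    have hgetD : r.getD j 2 = r[j] := by
      simp [List.getD_eq_getElem?_getD, List.getElem?_eq_getElem hrlen]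
    have hlt : (r.take j).length = j := by simp [List.length_take]; omega
    have hsplit : r.take (j + 1) = r.take j ++ [r.getD j 2] := by
      rw [List.take_succ, List.getElem?_eq_getElem hrlen, hgetD]; rfl
    have hbit : r.getD j 2 = 0 ∨ r.getD j 2 = 1 := by
      rw [hcrit]; exact crit_mem ft _ _
    have hbin1 : ∀ v ∈ r.take (j + 1), v = 0 ∨ v = 1 := by
      intro v hv
      rw [hsplit] at hv
      rcases List.mem_append.mp hv with hmem | hmem
      · exact hbin v hmem
      · rw [List.mem_singleton] at hmem; subst hmem; exact hbit
    -- the count at path (r.take j ++ [v]) is counter[v] over A's surviving rows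
    have keyCnt : ∀ v : Int,
        L.countP (fun b => b.take ((r.take j ++ [v]).length) == (r.take j ++ [v])) = cntAt L r j v := by
      intro v
      have hlen1 : (r.take j ++ [v]).length = j + 1 := by simp [hlt]
      rw [hlen1]
      unfold cntAt Sel
      rw [List.countP_filter]
      apply List.countP_congr
      intro b hb
      by_cases hp : pref r j b = true
      · have hbl : j < b.length := hin b (List.mem_filter.mpr ⟨hb, hp⟩)
        have hbt : b.take j = r.take j := by simpa [pref] using hp
        rw [List.take_succ, List.getElem?_eq_getElem hbl, Bool.eq_iff_iff]
        simp [hp, hbt, beq_iff_eq, List.getD_eq_getElem?_getD, List.getElem?_eq_getElem hbl,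
          ← List.concat_eq_append, List.concat_inj]
      · have hl : (b.take (j + 1) == r.take j ++ [v]) = false := by
          apply Bool.eq_false_iff.mpr
          intro heq
          apply hp
          have heq' : b.take (j + 1) = r.take j ++ [v] := by simpa using heq
          have hbj : b.take j = (r.take j ++ [v]).take j := by
            rw [← heq', List.take_take]
            congr 1
            omega
          rw [List.take_append_of_le_length (le_of_eq hlt.symm), List.take_take] at hbj
          have hbj' : b.take j = r.take j := by
            rw [hbj]
            congr 1
            omega
          simp [pref, hbj']
        rw [hl, Bool.eq_false_iff.mpr (fun hq => hp (Bool.and_elim_right hq))]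
    have hbinz : ∀ v ∈ r.take j ++ [(0 : Int)], v = 0 ∨ v = 1 := by
      intro v hv
      rcases List.mem_append.mp hv with h | h
      · exact hbin v h
      · rw [List.mem_singleton] at h; exact Or.inl h
    have hbino : ∀ v ∈ r.take j ++ [(1 : Int)], v = 0 ∨ v = 1 := by
      intro v hv
      rcases List.mem_append.mp hv with h | h
      · exact hbin v h
      · rw [List.mem_singleton] at h; exact Or.inr h
    have hz : (reachT (buildT L) (r.take j)).zOf.cntOf = cntAt L r j 0 := by
      rw [show (reachT (buildT L) (r.take j)).zOf = reachT (buildT L) (r.take j ++ [0]) from by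
            rw [reach_snoc]; norm_num,
        Hcnt _ hbinz, keyCnt]
    have ho : (reachT (buildT L) (r.take j)).oOf.cntOf = cntAt L r j 1 := by
      rw [show (reachT (buildT L) (r.take j)).oOf = reachT (buildT L) (r.take j ++ [1]) from by
            rw [reach_snoc]; norm_num,
        Hcnt _ hbino, keyCnt]
    have hlen1' : (r.take (j + 1)).length = j + 1 := by simp [List.length_take]; omega
    have hchild_cnt : (reachT (buildT L) (r.take (j + 1))).cntOf = (Sel L r (j + 1)).length := by
      rw [Hcnt _ hbin1, hlen1']
      unfold Sel pref
      rw [List.countP_eq_length_filter]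
    -- the chosen child is the node at path r.take (j+1)
    have hchild : (if ft == "oxygen"
          then (if (reachT (buildT L) (r.take j)).oOf.cntOf ≥ (reachT (buildT L) (r.take j)).zOf.cntOf
                then (reachT (buildT L) (r.take j)).oOf else (reachT (buildT L) (r.take j)).zOf)
          else (if (reachT (buildT L) (r.take j)).zOf.cntOf ≤ (reachT (buildT L) (r.take j)).oOf.cntOf
                then (reachT (buildT L) (r.take j)).zOf else (reachT (buildT L) (r.take j)).oOf))
        = reachT (buildT L) (r.take (j + 1)) := by
      have hz' : (reachT (buildT L) (r.take j)).zOf = reachT (buildT L) (r.take j ++ [0]) := by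
        rw [reach_snoc]; norm_num
      have ho' : (reachT (buildT L) (r.take j)).oOf = reachT (buildT L) (r.take j ++ [1]) := by
        rw [reach_snoc]; norm_num
      rw [hz, ho]
      rcases hft with rfl | rfl
      · rw [if_pos (by rfl)]
        rw [hcrit] at hsplit
        unfold crit at hsplit
        rw [if_pos rfl] at hsplit
        by_cases hge : cntAt L r j 0 ≤ cntAt L r j 1
        · rw [if_pos hge, ho', hsplit, if_pos hge]
        · rw [if_neg hge, hz', hsplit, if_neg hge]
      · rw [if_neg (by decide)]
        rw [hcrit] at hsplit
        unfold crit at hsplit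
        rw [if_neg (show ¬("co2" = "oxygen") by decide)] at hsplit
        by_cases hge : cntAt L r j 0 ≤ cntAt L r j 1
        · rw [if_pos hge, hz', hsplit, if_pos hge]
        · rw [if_neg hge, ho', hsplit, if_neg hge]
    simp only [descend]
    rw [hchild]
    have hmem1 : r ∈ Sel L r (j + 1) := mem_Sel_self hr (j + 1)
    cases hc : reachT (buildT L) (r.take (j + 1)) with
    | nil =>
      exfalso
      rw [hc] at hchild_cnt
      have : (Sel L r (j + 1)).length ≠ 0 := by
        intro hzero
        rw [List.length_eq_zero_iff] at hzero
        rw [hzero] at hmem1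
        cases hmem1
      exact this hchild_cnt.symm
    | node c row z o =>
      rw [hc] at hchild_cnt
      have hcval : c = (Sel L r (j + 1)).length := hchild_cnt
      by_cases hone : (Sel L r (j + 1)).length = 1
      · have hsel : Sel L r (j + 1) = [r] := singleton_of_len_one hone (mem_Sel_self hr (j + 1))
        have hrow : row = r := by
          have hrb := row_build_aux (r.take (j + 1)) hbin1 L BTrie.nil (reach_nil _)
          rw [show (L.foldl (fun t b => bump t b b) BTrie.nil) = buildT L from rfl, hc] at hrb
          rw [hlen1'] at hrb
          have : L.filter (fun b => b.take (j + 1) == r.take (j + 1)) = Sel L r (j + 1) := rfl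
          rw [this, hsel] at hrb
          simpa [BTrie.rowOf] using hrb
        have hceq : (c == 1) = true := by rw [hcval, hone]; rfl
        simp [hceq, hrow]
      · have hjk : j < k := by
          rcases Nat.lt_or_ge j k with hlt' | hge'
          · exact hlt'
          · exfalso; have : j = k := le_antisymm hj hge'; subst this; exact hone h1
        have hcne : (c == 1) = false := by
          rw [hcval]; simp [hone]
        simp only [hcne, Bool.false_eq_true, if_false]
        rw [← hc]
        exact ih (j + 1) hjk (by omega) hbin1

-- ===== VERDICT (by name: the statement is the Claim_ definition above) =====
theorem filtering_calculator_spec : Claim_equal_filtering_calculator := by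
  intro L ft _ hpre
  obtain ⟨hft, r, hr, k, hkmem, hall, h1⟩ := hpre
  have hok : ∀ j ≤ k, okStep L ft r j = true := by
    intro j hj
    exact List.all_eq_true.mp hall j (List.mem_range.mpr (Nat.lt_succ_of_le hj))
  have hk : k < headDim L := List.mem_range.mp hkmem
  unfold Spec_filtering_calculator
  rcases L with _ | ⟨h, t⟩
  · cases hr
  · have hkh : k < h.length := hk
    have hA : filtering_calculator (h :: t) ft = r := by
      unfold filtering_calculator
      rw [PySem.List.pyGet?_zero_cons]
      have hl := aLoop_eq (h :: t) ft r hft hr k hok h1 h.length 0 (Nat.zero_le k) (by omega)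
      rw [Sel_zero] at hl
      simp [hl]
    have hB : filtering_calculator_alt (h :: t) ft = r := by
      unfold filtering_calculator_alt
      have hcond : (ft == "oxygen" || ft == "co2") = true := by
        rcases hft with rfl | rfl <;> rfl
      rw [hcond]
      have hd := descend_eq (h :: t) ft r hft hr k hok h1 h.length 0 (Nat.zero_le k) (by omega)
        (by simp)
      rw [List.take_zero] at hd
      have : reachT (buildT (h :: t)) [] = buildT (h :: t) := rfl
      rw [this] at hd
      simp [hd]
    rw [hA, hB]
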